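-- pv_equiv track=rewrite | github.com/tgh561/AOIS | Lab_2/parser.py | find_main_operator
-- ===== SOURCE A (Python) =====
-- def find_main_operator(s: str):
--     if not s:
--         return None, None
--     operators = {
--         "~": (0, "left"),
--         "->": (1, "right"),
--         "|": (2, "left"),
--         "&": (3, "left"),
--     }
--     min_pri = float("inf")
--     pos = -1
--     op_found = None
--     bracket_level = 0
--     i = 0
--     while i < len(s):
--         ch = s[i]
--         if ch == "(":
--             bracket_level += 1
--         elif ch == ")":
--             bracket_level -= 1
--         elif bracket_level == 0:
--             current_op = None
--             op_len = 1
--             if i + 1 < len(s) and s[i : i + 2] == "->":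
--                 current_op = "->"
--                 op_len = 2
--             elif ch == "|":
--                 current_op = "|"
--             elif ch == "&":
--                 current_op = "&"
--             elif ch == "~":
--                 current_op = "~"
--
--             if current_op:
--                 pri, assoc = operators[current_op]
--                 update = False
--                 if pri < min_pri:
--                     update = True
--                 elif pri == min_pri and assoc == "left":
--                     update = True
--                 if update:
--                     min_pri = pri
--                     pos = i
--                     op_found = current_op
--                 i += op_len - 1
--         i += 1
--     return (pos, op_found) if pos != -1 else (None, None)
-- ===== SOURCE B (Python) =====
-- def _priority(op):
--     if op == "~":
--         return 0
--     if op == "->":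
--         return 1
--     if op == "|":
--         return 2
--     return 3
--
--
-- def _collect_top_level_ops(s):
--     out = []
--     level = 0
--     i = 0
--     while i < len(s):
--         ch = s[i]
--         if ch == "(":
--             level += 1
--         elif ch == ")":
--             level -= 1
--         elif level == 0:
--             if s[i:i + 2] == "->":
--                 out.append((i, "->"))
--                 i += 1
--             elif ch in ("|", "&", "~"):
--                 out.append((i, ch))
--         i += 1
--     return out
--
--
-- def find_main_operator(s: str):
--     ops = _collect_top_level_ops(s)
--     if not ops:
--         return None, None
--     m = min(_priority(op) for _, op in ops)
--     cand = [(i, op) for i, op in ops if _priority(op) == m]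
--     if cand[0][1] == "->":
--         return cand[0]
--     return cand[-1]
-- ===== Notes on version B (the rewrite author's own statement) =====
-- stated objective: alternative
-- what changed: A selects the main operator on the fly with min-priority/position/associativity bookkeeping inside its scanning loop; B first collects all top-level operators with their positions in one pass, then selects purely from that list: minimum priority, filter, first occurrence for right-associative '->' and last occurrence otherwise.
import Mathlib
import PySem

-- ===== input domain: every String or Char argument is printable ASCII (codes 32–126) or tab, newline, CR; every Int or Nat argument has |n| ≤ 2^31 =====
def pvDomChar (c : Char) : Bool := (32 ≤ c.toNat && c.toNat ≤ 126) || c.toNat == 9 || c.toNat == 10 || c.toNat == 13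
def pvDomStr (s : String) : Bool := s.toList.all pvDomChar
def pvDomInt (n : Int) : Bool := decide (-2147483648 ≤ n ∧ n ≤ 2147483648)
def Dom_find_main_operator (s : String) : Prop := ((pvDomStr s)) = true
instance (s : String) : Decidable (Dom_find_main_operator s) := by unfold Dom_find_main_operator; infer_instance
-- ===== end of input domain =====

-- B replaces A's in-loop minimum/position bookkeeping by a collect-then-select decomposition
-- (pass 1 lists the top-level operators, pass 2 picks by min priority and associativity); objective: alternative.

-- ===== PORT A =====

-- A's `operators` dict; every lookup in A is with one of the four keys, so a total function is exact.
def pvOpsA (op : String) : Int × String :=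
  if op = "~" then (0, "left")
  else if op = "->" then (1, "right")
  else if op = "|" then (2, "left")
  else (3, "left")

-- A's shared update block (`pri, assoc = operators[current_op]; update = …`), applied once per found operator.
def pvUpdA (st : Option Int × Int × Option String) (i : Int) (op : String) :
    Option Int × Int × Option String :=
  let pa := pvOpsA op
  let update : Bool :=
    match st.1 with
    | none => true                         -- pri < float("inf")
    | some m => pa.1 < m || (pa.1 == m && pa.2 == "left")
  if update then (some pa.1, i, some op) else st

-- A's while loop: i, bracket_level, (min_pri, pos, op_found); min_pri = none means float("inf").
def pvLoopA (cs : List Char) (i : Int) (bl : Int)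
    (st : Option Int × Int × Option String) : Option Int × Int × Option String :=
  match cs with
  | [] => st
  | c :: rest =>
    if c = '(' then pvLoopA rest (i+1) (bl+1) st
    else if c = ')' then pvLoopA rest (i+1) (bl-1) st
    else if bl = 0 then
      if c = '-' ∧ rest.head? = some '>' then pvLoopA rest.tail (i+2) bl (pvUpdA st i "->")   -- s[i:i+2] == "->", i += op_len
      else if c = '|' then pvLoopA rest (i+1) bl (pvUpdA st i "|")
      else if c = '&' then pvLoopA rest (i+1) bl (pvUpdA st i "&")
      else if c = '~' then pvLoopA rest (i+1) bl (pvUpdA st i "~")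
      else pvLoopA rest (i+1) bl st
    else pvLoopA rest (i+1) bl st
  termination_by cs.length
  decreasing_by all_goals (simp [List.length_tail]; try omega)

def find_main_operator (s : String) : Option Int × Option String :=
  if s.toList = [] then (none, none)       -- if not s
  else
    let st := pvLoopA s.toList 0 0 (none, -1, none)
    if st.2.1 ≠ -1 then (some st.2.1, st.2.2) else (none, none)

-- ===== PORT B =====

def pvPrioB (op : String) : Int :=
  if op = "~" then 0
  else if op = "->" then 1
  else if op = "|" then 2
  else 3

-- Source B's _collect_top_level_ops
def pvCollect (cs : List Char) (level : Int) (i : Int) : List (Int × String) :=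
  match cs with
  | [] => []
  | c :: rest =>
    if c = '(' then pvCollect rest (level+1) (i+1)
    else if c = ')' then pvCollect rest (level-1) (i+1)
    else if level = 0 then
      if c = '-' ∧ rest.head? = some '>' then (i, "->") :: pvCollect rest.tail level (i+2)
      else if c = '|' ∨ c = '&' ∨ c = '~' then (i, String.ofList [c]) :: pvCollect rest level (i+1)
      else pvCollect rest level (i+1)
    else pvCollect rest level (i+1)
  termination_by cs.length
  decreasing_by all_goals (simp [List.length_tail]; try omega)

def find_main_operator_alt (s : String) : Option Int × Option String :=
  let ops := pvCollect s.toList 0 0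
  if ops.isEmpty then (none, none)
  else
    let m := (PySem.List.min? (ops.map fun e => pvPrioB e.2) (fun y => y)).getD 0  -- min(); ops nonempty, getD unreachable
    let cand := ops.filter (fun e => pvPrioB e.2 == m)
    match cand with
    | [] => (none, none)                   -- unreachable: cand is provably nonempty (Python cand[0] would raise)
    | d0 :: drest =>
      if d0.2 = "->" then (some d0.1, some d0.2)                       -- right-assoc: first occurrence
      else
        let dl := (d0 :: drest).getLast (by simp)                      -- left-assoc: last occurrence
        (some dl.1, some dl.2)

-- ===== PRECONDITION & SPEC =====
def Spec_find_main_operator (s : String) (out : Option Int × Option String) : Prop := out = find_main_operator_alt s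
instance (s : String) (out : Option Int × Option String) : Decidable (Spec_find_main_operator s out) := by unfold Spec_find_main_operator; infer_instance

-- ===== CLAIM (what is proved, stated in full; the proofs are below) =====
def Claim_equal_find_main_operator : Prop := ∀ (s : String), Dom_find_main_operator s → Spec_find_main_operator s (find_main_operator s)

-- ===== LEMMAS AND PROOFS =====

def pvInit : Option Int × Int × Option String := (none, -1, none)

def pvStep (st : Option Int × Int × Option String) (e : Int × String) :
    Option Int × Int × Option String := pvUpdA st e.1 e.2

-- every collected entry is one of the four operators and has index ≥ the running start
def pvGood (L : List (Int × String)) : Prop :=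
  ∀ e ∈ L, (e.2 = "~" ∨ e.2 = "->" ∨ e.2 = "|" ∨ e.2 = "&") ∧ 0 ≤ e.1

-- minimum priority of a list of entries (4 = +inf sentinel, all priorities are ≤ 3)
def pvMref (L : List (Int × String)) : Int :=
  L.foldl (fun a e => min a (pvPrioB e.2)) 4

def pvCand (L : List (Int × String)) : List (Int × String) :=
  L.filter (fun e => pvPrioB e.2 == pvMref L)

def pvOpOf (m : Int) : String :=
  if m = 0 then "~" else if m = 1 then "->" else if m = 2 then "|" else "&"

def pvPosRef (L : List (Int × String)) : Int :=
  if pvMref L = 1 then ((pvCand L).head?).elim 0 (·.1)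
  else ((pvCand L).getLast?).elim 0 (·.1)

theorem pvLoopA_foldl : ∀ (cs : List Char) (i bl : Int) st,
    pvLoopA cs i bl st = (pvCollect cs bl i).foldl pvStep st := by
  intro cs i bl st
  fun_induction pvLoopA cs i bl st with
  | _ =>
    rw [pvCollect]; simp_all [pvStep]
    try (split <;> simp_all)

theorem pvCollect_entries : ∀ (cs : List Char) (level i : Int),
    ∀ e ∈ pvCollect cs level i, (e.2 = "~" ∨ e.2 = "->" ∨ e.2 = "|" ∨ e.2 = "&") ∧ i ≤ e.1 := by
  intro cs level i
  fun_induction pvCollect cs level i with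
  | _ =>
    intro e he
    obtain ⟨a, b⟩ := e
    try simp_all
    all_goals try (rcases he with ⟨rfl, rfl⟩ | he)
    all_goals try (rename_i ih
                   exact ⟨(ih a b he).1, by have := (ih a b he).2; omega⟩)
    all_goals try exact ⟨by decide, by omega⟩
    all_goals (rename_i himp hc ih
               exact ⟨by rcases hc with rfl | rfl | rfl <;> decide, by omega⟩)

theorem pvCollect_good (cs : List Char) (level i : Int) (h : 0 ≤ i) :
    pvGood (pvCollect cs level i) := by
  intro e he
  have := pvCollect_entries cs level i e he
  exact ⟨this.1, by omega⟩

def pvMrefA (M : List (Int × String)) (a : Int) : Int :=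
  M.foldl (fun b x => min b (pvPrioB x.2)) a

theorem pvPrioB_le3 (op : String) : pvPrioB op ≤ 3 := by
  unfold pvPrioB; split_ifs <;> norm_num

theorem pvMrefA_le_init : ∀ (M : List (Int × String)) (a : Int), pvMrefA M a ≤ a := by
  intro M
  induction M with
  | nil => intro a; simp [pvMrefA]
  | cons x t ih =>
    intro a
    have := ih (min a (pvPrioB x.2))
    simp only [pvMrefA, List.foldl_cons] at *
    omega

theorem pvMrefA_le_mem : ∀ (M : List (Int × String)) (a : Int), ∀ e ∈ M, pvMrefA M a ≤ pvPrioB e.2 := by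
  intro M
  induction M with
  | nil => intro a e he; simp at he
  | cons x t ih =>
    intro a e he
    rcases List.mem_cons.mp he with rfl | he'
    · have := pvMrefA_le_init t (min a (pvPrioB e.2))
      simp only [pvMrefA, List.foldl_cons] at *
      omega
    · exact ih _ e he'

theorem pvMrefA_append (M : List (Int × String)) (x : Int × String) (a : Int) :
    pvMrefA (M ++ [x]) a = min (pvMrefA M a) (pvPrioB x.2) := by
  simp [pvMrefA, List.foldl_append]

theorem pvMref_append (M : List (Int × String)) (x : Int × String) :
    pvMref (M ++ [x]) = min (pvMref M) (pvPrioB x.2) := pvMrefA_append M x 4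

theorem pvGoodFacts (op : String) (h : op = "~" ∨ op = "->" ∨ op = "|" ∨ op = "&") :
    pvOpsA op = (pvPrioB op, if pvPrioB op = 1 then "right" else "left") ∧
    pvOpOf (pvPrioB op) = op := by
  rcases h with rfl | rfl | rfl | rfl <;> constructor <;> decide

theorem pvFoldChar : ∀ (L : List (Int × String)), pvGood L → L ≠ [] →
    pvCand L ≠ [] ∧
    L.foldl pvStep pvInit = (some (pvMref L), pvPosRef L, some (pvOpOf (pvMref L))) := by
  intro L
  induction L using List.reverseRecOn with
  | nil => intro _ h; cases h rfl
  | append_singleton M x ih =>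
    intro hg _
    have hgx := hg x (by simp)
    obtain ⟨hops, hopof⟩ := pvGoodFacts x.2 hgx.1
    rcases eq_or_ne M [] with rfl | hM
    · -- M = [] : the single-element list
      obtain ⟨a, b⟩ := x
      have hp3 := pvPrioB_le3 b
      have hm : pvMref [(a, b)] = pvPrioB b := by
        simp [pvMref]; omega
      have hcand : pvCand [(a, b)] = [(a, b)] := by
        simp [pvCand, hm]
      refine ⟨by simp [hcand], ?_⟩
      simp only [List.nil_append, List.foldl_cons, List.foldl_nil, pvStep, pvUpdA, pvInit]
      simp only at hops
      simp [hops, hm, hopof, pvPosRef, hcand]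
      try (split_ifs <;> simp)
    · obtain ⟨hcne, hfold⟩ := ih (fun e he => hg e (by simp [he])) hM
      rw [List.foldl_append, List.foldl_cons, List.foldl_nil, hfold]
      have hmm : pvMref (M ++ [x]) = min (pvMref M) (pvPrioB x.2) := pvMref_append M x
      have hMle : ∀ e ∈ M, pvMref M ≤ pvPrioB e.2 := fun e he => pvMrefA_le_mem M 4 e he
      rcases lt_trichotomy (pvPrioB x.2) (pvMref M) with hlt | heqp | hgt
      · -- strictly smaller priority: x takes over
        have hmin : pvMref (M ++ [x]) = pvPrioB x.2 := by rw [hmm]; omega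
        have hfilM : M.filter (fun e => pvPrioB e.2 == pvPrioB x.2) = [] := by
          rw [List.filter_eq_nil_iff]; intro e he
          have := hMle e he; simp; omega
        have hcand : pvCand (M ++ [x]) = [x] := by
          simp only [pvCand, List.filter_append, hmin]
          simp [hfilM]
        refine ⟨by simp [hcand], ?_⟩
        simp only [pvStep, pvUpdA, hops]
        simp only [hlt, decide_true, Bool.true_or, if_pos]
        simp [hmin, hopof, pvPosRef, hcand]
        try (split_ifs <;> simp)
      · -- equal priority: associativity decides
        have hmin : pvMref (M ++ [x]) = pvMref M := by rw [hmm]; omega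
        have hcand : pvCand (M ++ [x]) = pvCand M ++ [x] := by
          simp only [pvCand, List.filter_append, hmin, List.filter]
          rw [heqp]; simp
        by_cases h1 : pvPrioB x.2 = 1
        · -- right-associative "->": keep the first occurrence
          refine ⟨by simp [hcand], ?_⟩
          simp only [pvStep, pvUpdA, hops]
          have hupd : (decide (pvPrioB x.2 < pvMref M) ||
              (pvPrioB x.2 == pvMref M && ("right" == "left"))) = false := by
            simp; omega
          rw [if_pos h1]
          simp only [hupd, Bool.false_eq_true, if_false]
          have hpos : pvPosRef (M ++ [x]) = pvPosRef M := by
            simp only [pvPosRef, hmin, hcand, ← heqp, h1, if_pos]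
            obtain ⟨c, t, hct⟩ := List.exists_cons_of_ne_nil hcne
            rw [hct]; simp
          rw [hmin, hpos]
        · -- left-associative: the new occurrence wins
          refine ⟨by simp [hcand], ?_⟩
          simp only [pvStep, pvUpdA, hops]
          have hupd : (decide (pvPrioB x.2 < pvMref M) ||
              (pvPrioB x.2 == pvMref M && ("left" == "left"))) = true := by
            simp [heqp]
          rw [if_neg h1]
          simp only [hupd, if_true]
          have hpos : pvPosRef (M ++ [x]) = x.1 := by
            simp only [pvPosRef, hmin, ← heqp, h1, hcand, List.getLast?_concat]
            simp
          rw [hmin, hpos, ← heqp, hopof]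
      · -- larger priority: x is ignored
        have hmin : pvMref (M ++ [x]) = pvMref M := by rw [hmm]; omega
        have hcand : pvCand (M ++ [x]) = pvCand M := by
          simp only [pvCand, List.filter_append, hmin, List.filter]
          have : (pvPrioB x.2 == pvMref M) = false := by simp; omega
          simp [this]
        have hupd : (decide (pvPrioB x.2 < pvMref M) ||
            (pvPrioB x.2 == pvMref M &&
              ((if pvPrioB x.2 = 1 then "right" else "left") == "left"))) = false := by
          have hne : (pvPrioB x.2 == pvMref M) = false := by simp; omega
          simp [hne]; omega
        refine ⟨by rw [hcand]; exact hcne, ?_⟩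
        simp only [pvStep, pvUpdA, hops]
        simp only [hupd, Bool.false_eq_true, if_false]
        have hpos : pvPosRef (M ++ [x]) = pvPosRef M := by
          simp only [pvPosRef, hmin, hcand]
        rw [hmin, hpos]

-- ===== VERDICT (by name: the statement is the Claim_ definition above) =====
theorem find_main_operator_spec : Claim_equal_find_main_operator := by
  unfold Claim_equal_find_main_operator Spec_find_main_operator
  intro s _
  unfold find_main_operator find_main_operator_alt
  by_cases hnil : s.toList = []
  · simp [hnil, pvCollect]
  · rw [if_neg hnil]
    have hg : pvGood (pvCollect s.toList 0 0) := pvCollect_good s.toList 0 0 (le_refl 0)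
    rw [pvLoopA_foldl]
    by_cases hLn : pvCollect s.toList 0 0 = []
    · simp [hLn, pvInit]
    · obtain ⟨hcne, hfold⟩ := pvFoldChar _ hg hLn
      simp only [pvInit] at hfold
      rw [hfold]
      obtain ⟨e0, t0, hLe⟩ := List.exists_cons_of_ne_nil hLn
      have hmB : (PySem.List.min? ((pvCollect s.toList 0 0).map fun e => pvPrioB e.2)
          (fun y => y)).getD 0 = pvMref (pvCollect s.toList 0 0) := by
        rw [hLe]
        simp only [List.map_cons]
        rw [PySem.List.min?_id_cons]
        simp only [Option.getD_some]
        have h2 : pvMref (e0 :: t0) =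
            (t0.map (fun e => pvPrioB e.2)).foldl min (min 4 (pvPrioB e0.2)) := by
          simp [pvMref, pvMrefA, List.foldl_map]
        rw [h2]
        congr 1
        have := pvPrioB_le3 e0.2
        omega
      have hEmp : (pvCollect s.toList 0 0).isEmpty = false := by
        simpa using hLn
      simp only [hEmp, Bool.false_eq_true, if_false, hmB]
      have hfe : List.filter (fun e => pvPrioB e.2 == pvMref (pvCollect s.toList 0 0))
          (pvCollect s.toList 0 0) = pvCand (pvCollect s.toList 0 0) := rfl
      rw [hfe]
      obtain ⟨d0, ds, hds⟩ := List.exists_cons_of_ne_nil hcne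
      rw [hds]
      have hd0mem : d0 ∈ pvCand (pvCollect s.toList 0 0) := by
        rw [hds]; exact List.mem_cons_self
      have hd0L := List.mem_filter.mp hd0mem
      have hd0pri : pvPrioB d0.2 = pvMref (pvCollect s.toList 0 0) := by
        simpa using hd0L.2
      have hopof0 := (pvGoodFacts d0.2 (hg d0 hd0L.1).1).2
      rw [hd0pri] at hopof0
      have hd0nn : 0 ≤ d0.1 := (hg d0 hd0L.1).2
      by_cases hd : d0.2 = "->"
      · have hm1 : pvMref (pvCollect s.toList 0 0) = 1 := by
          rw [← hd0pri, hd]; decide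
        have hpos : pvPosRef (pvCollect s.toList 0 0) = d0.1 := by
          simp [pvPosRef, hm1, hds]
        simp only [hpos, hd, if_pos]
        rw [if_pos (by simp; omega)]
        rw [hopof0, hd]
      · have hm1 : pvMref (pvCollect s.toList 0 0) ≠ 1 := by
          intro h; exact hd (by rw [← hopof0, h]; rfl)
        have hglmem : (d0 :: ds).getLast (by simp) ∈ pvCand (pvCollect s.toList 0 0) := by
          rw [hds]; exact List.getLast_mem _
        have hglL := List.mem_filter.mp hglmem
        have hglpri : pvPrioB ((d0 :: ds).getLast (by simp)).2 =
            pvMref (pvCollect s.toList 0 0) := by simpa using hglL.2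
        have hopofgl := (pvGoodFacts _ (hg _ hglL.1).1).2
        rw [hglpri] at hopofgl
        have hglnn : 0 ≤ ((d0 :: ds).getLast (by simp)).1 := (hg _ hglL.1).2
        have hpos : pvPosRef (pvCollect s.toList 0 0) = ((d0 :: ds).getLast (by simp)).1 := by
          simp only [pvPosRef, hm1, hds]
          rw [List.getLast?_eq_some_getLast (by simp)]
          rfl
        simp only [hpos, hd, if_false]
        rw [if_pos (by simp; omega)]
        rw [hopofgl]
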